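-- pv_equiv track=rewrite | github.com/manvelgasparyan/BlockBioNet | lib/engine.py | autonomous_pairs_species_cyclicQ
-- ===== SOURCE A (Python) =====
-- def autonomous_pairs_species_cyclicQ (r_sccs_names, r_sccs_indices, r_sccs_scores):
--     #--------
--     m = min(r_sccs_scores)
--     M = max(r_sccs_scores)
--     #--------
--     AP_species_index = []
--     AP_species_names = []
--     #--------
--     AP_i = []
--     AP_ii = []
--     for i in range(m, M+1):
--         indices = [index for index, value in enumerate(r_sccs_scores) if value == i]
--         for item in indices:
--             AP_i.extend(r_sccs_indices[item])
--             AP_ii.extend(r_sccs_names[item])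
--         #--------
--         AP_species_index.append(AP_i.copy())
--         AP_species_names.append(AP_ii.copy())
--     #--------
--     return AP_species_index, AP_species_names
-- ===== SOURCE B (Python) =====
-- def autonomous_pairs_species_cyclicQ(r_sccs_names, r_sccs_indices, r_sccs_scores):
--     m = min(r_sccs_scores)
--     M = max(r_sccs_scores)
--     # stable sort of the positions by score: ties keep original enumerate order
--     rem = sorted(enumerate(r_sccs_scores), key=lambda p: p[1])
--     AP_species_index = []
--     AP_species_names = []
--     AP_i = []
--     AP_ii = []
--     p = 0
--     n = len(rem)
--     for i in range(m, M + 1):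
--         # two-pointer sweep: consume the sorted prefix whose score is <= i
--         while p < n and rem[p][1] <= i:
--             j = rem[p][0]
--             AP_i = AP_i + r_sccs_indices[j]
--             AP_ii = AP_ii + r_sccs_names[j]
--             p += 1
--         AP_species_index.append(AP_i)
--         AP_species_names.append(AP_ii)
--     return AP_species_index, AP_species_names
-- ===== Notes on version B (the rewrite author's own statement) =====
-- stated objective: alternative
-- what changed: Instead of rescanning the whole score list once per value of range(min,max+1), B stably sorts the enumerated positions by score once and then does a single two-pointer sweep over the range, consuming the sorted prefix with score <= i at each step; the per-value inner scan disappears.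
import Mathlib
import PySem

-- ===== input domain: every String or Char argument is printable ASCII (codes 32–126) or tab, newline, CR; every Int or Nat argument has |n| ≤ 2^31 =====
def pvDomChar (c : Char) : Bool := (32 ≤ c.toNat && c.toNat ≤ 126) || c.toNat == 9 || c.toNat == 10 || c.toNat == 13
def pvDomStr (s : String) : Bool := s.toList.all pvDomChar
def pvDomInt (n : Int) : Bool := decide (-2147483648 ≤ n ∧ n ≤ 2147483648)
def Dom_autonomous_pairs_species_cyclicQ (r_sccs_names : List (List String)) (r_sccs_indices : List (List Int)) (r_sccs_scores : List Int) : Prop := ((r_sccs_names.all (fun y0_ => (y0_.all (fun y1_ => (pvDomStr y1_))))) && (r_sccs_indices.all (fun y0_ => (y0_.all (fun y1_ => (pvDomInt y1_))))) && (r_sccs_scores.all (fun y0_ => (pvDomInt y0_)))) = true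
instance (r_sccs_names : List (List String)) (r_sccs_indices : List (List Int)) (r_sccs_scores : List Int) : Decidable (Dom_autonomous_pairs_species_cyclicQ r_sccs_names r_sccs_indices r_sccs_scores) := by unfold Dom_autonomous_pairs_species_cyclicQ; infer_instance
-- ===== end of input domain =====

-- B replaces A's per-score-value rescans of the whole list by one stable sort of the
-- enumerated positions plus a single two-pointer sweep over the score range (objective: alternative —
-- the per-value inner rescan disappears).

-- ===== PORT A =====
def autonomous_pairs_species_cyclicQ (r_sccs_names : List (List String)) (r_sccs_indices : List (List Int)) (r_sccs_scores : List Int) : List (List Int) × List (List String) :=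
  match PySem.List.min? r_sccs_scores (fun x => x), PySem.List.max? r_sccs_scores (fun x => x) with
  | some m, some M =>
    let st := (PySem.List.pyRange m (M + 1) 1).foldl
      (fun (st : List Int × List String × List (List Int) × List (List String)) i =>
        -- indices = [index for index, value in enumerate(r_sccs_scores) if value == i]
        let indices := ((PySem.List.enumerate r_sccs_scores 0).filter (fun p => p.2 == i)).map (·.1)
        -- for item in indices: AP_i.extend(...); AP_ii.extend(...)
        let ap := indices.foldl
          (fun (ap : List Int × List String) item =>
            (ap.1 ++ PySem.List.pyGetD r_sccs_indices item [],
             ap.2 ++ PySem.List.pyGetD r_sccs_names item []))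
          (st.1, st.2.1)
        (ap.1, ap.2, st.2.2.1 ++ [ap.1], st.2.2.2 ++ [ap.2]))
      ([], [], [], [])
    (st.2.2.1, st.2.2.2)
  | _, _ => ([], [])  -- min()/max() of an empty list raise ValueError: excluded by Pre_

-- ===== PORT B =====
-- B's inner while loop: consume the sorted prefix whose score is ≤ i, extending both
-- accumulators (the Python pointer advance 'p += 1' is ported as consuming the remainder
-- of the sorted list — exact).
def pvSweep (r_sccs_indices : List (List Int)) (r_sccs_names : List (List String)) (i : Int) :
    List (Int × Int) → List Int → List String → List (Int × Int) × List Int × List String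
  | [], a, b => ([], a, b)
  | p :: t, a, b =>
    if p.2 ≤ i then
      pvSweep r_sccs_indices r_sccs_names i t
        (a ++ PySem.List.pyGetD r_sccs_indices p.1 [])
        (b ++ PySem.List.pyGetD r_sccs_names p.1 [])
    else (p :: t, a, b)

def autonomous_pairs_species_cyclicQ_alt (r_sccs_names : List (List String)) (r_sccs_indices : List (List Int)) (r_sccs_scores : List Int) : List (List Int) × List (List String) :=
  match PySem.List.min? r_sccs_scores (fun x => x) with
  | none => ([], [])  -- min() of an empty list raises ValueError: excluded by Pre_
  | some m =>
    match PySem.List.max? r_sccs_scores (fun x => x) with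
    | none => ([], [])
    | some M =>
      -- rem = sorted(enumerate(r_sccs_scores), key=lambda p: p[1])  (stable)
      let rem0 := PySem.List.sorted (PySem.List.enumerate r_sccs_scores 0) (fun p => p.2)
      let st := (PySem.List.pyRange m (M + 1) 1).foldl
        (fun (st : List (Int × Int) × List Int × List String × List (List Int) × List (List String)) i =>
          let sw := pvSweep r_sccs_indices r_sccs_names i st.1 st.2.1 st.2.2.1
          (sw.1, sw.2.1, sw.2.2, st.2.2.2.1 ++ [sw.2.1], st.2.2.2.2 ++ [sw.2.2]))
        (rem0, [], [], [], [])
      (st.2.2.2.1, st.2.2.2.2)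

-- ===== PRECONDITION & SPEC =====
-- Python A raises ValueError on empty r_sccs_scores and IndexError when some enumerated
-- position of r_sccs_scores is out of range of r_sccs_indices or r_sccs_names.
def Pre_autonomous_pairs_species_cyclicQ (r_sccs_names : List (List String)) (r_sccs_indices : List (List Int)) (r_sccs_scores : List Int) : Prop :=
  r_sccs_scores ≠ [] ∧ r_sccs_scores.length ≤ r_sccs_indices.length ∧ r_sccs_scores.length ≤ r_sccs_names.length
instance (r_sccs_names : List (List String)) (r_sccs_indices : List (List Int)) (r_sccs_scores : List Int) : Decidable (Pre_autonomous_pairs_species_cyclicQ r_sccs_names r_sccs_indices r_sccs_scores) := by unfold Pre_autonomous_pairs_species_cyclicQ; infer_instance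

def pvWitness_autonomous_pairs_species_cyclicQ : List (List String) × List (List Int) × List Int :=
  ([["x"], ["y", "z"]], [[1], [2, 3]], [1, 0])

def Spec_autonomous_pairs_species_cyclicQ (r_sccs_names : List (List String)) (r_sccs_indices : List (List Int)) (r_sccs_scores : List Int) (out : List (List Int) × List (List String)) : Prop := out = autonomous_pairs_species_cyclicQ_alt r_sccs_names r_sccs_indices r_sccs_scores
instance (r_sccs_names : List (List String)) (r_sccs_indices : List (List Int)) (r_sccs_scores : List Int) (out : List (List Int) × List (List String)) : Decidable (Spec_autonomous_pairs_species_cyclicQ r_sccs_names r_sccs_indices r_sccs_scores out) := by unfold Spec_autonomous_pairs_species_cyclicQ; infer_instance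

-- ===== CLAIM (what is proved, stated in full; the proofs are below) =====
def Claim_equal_autonomous_pairs_species_cyclicQ : Prop := ∀ (r_sccs_names : List (List String)) (r_sccs_indices : List (List Int)) (r_sccs_scores : List Int), Dom_autonomous_pairs_species_cyclicQ r_sccs_names r_sccs_indices r_sccs_scores → Pre_autonomous_pairs_species_cyclicQ r_sccs_names r_sccs_indices r_sccs_scores → Spec_autonomous_pairs_species_cyclicQ r_sccs_names r_sccs_indices r_sccs_scores (autonomous_pairs_species_cyclicQ r_sccs_names r_sccs_indices r_sccs_scores)

-- ===== LEMMAS AND PROOFS =====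

-- A's inner extend-loop over a list of positions, in closed form.
theorem foldl_extend_pair {α β γ : Type} (L : List α) (g : α → List β) (h : α → List γ)
    (a : List β) (b : List γ) :
    L.foldl (fun ap item => (ap.1 ++ g item, ap.2 ++ h item)) (a, b)
      = (a ++ L.flatMap g, b ++ L.flatMap h) := by
  induction L generalizing a b with
  | nil => simp
  | cons x t ih => simp [ih, List.append_assoc]

-- B's while loop in closed form: takeWhile is consumed, dropWhile remains.
theorem pvSweep_eq (idxs : List (List Int)) (names : List (List String)) (i : Int)
    (l : List (Int × Int)) (a : List Int) (b : List String) :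
    pvSweep idxs names i l a b
      = (l.dropWhile (fun p => decide (p.2 ≤ i)),
         a ++ (l.takeWhile (fun p => decide (p.2 ≤ i))).flatMap (fun p => PySem.List.pyGetD idxs p.1 []),
         b ++ (l.takeWhile (fun p => decide (p.2 ≤ i))).flatMap (fun p => PySem.List.pyGetD names p.1 [])) := by
  induction l generalizing a b with
  | nil => simp [pvSweep]
  | cons x t ih =>
    by_cases hx : x.2 ≤ i
    · simp [pvSweep, hx, ih, List.append_assoc]
    · simp [pvSweep, hx]

-- On a list sorted by score, takeWhile/dropWhile (score ≤ i) are the filters.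
theorem takeWhile_eq_filter_of_sorted (i : Int) (l : List (Int × Int))
    (h : l.Pairwise (fun a b => a.2 ≤ b.2)) :
    l.takeWhile (fun p => decide (p.2 ≤ i)) = l.filter (fun p => decide (p.2 ≤ i)) := by
  induction l with
  | nil => rfl
  | cons x t ih =>
    rcases List.pairwise_cons.mp h with ⟨hx, ht⟩
    by_cases hxi : x.2 ≤ i
    · simp [hxi, ih ht]
    · have : t.filter (fun p => decide (p.2 ≤ i)) = [] := by
        apply List.filter_eq_nil_iff.mpr
        intro y hy
        have := hx y hy
        simp; omega
      simp [hxi, this]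

theorem dropWhile_eq_filter_of_sorted (i : Int) (l : List (Int × Int))
    (h : l.Pairwise (fun a b => a.2 ≤ b.2)) :
    l.dropWhile (fun p => decide (p.2 ≤ i)) = l.filter (fun p => decide (i + 1 ≤ p.2)) := by
  induction l with
  | nil => rfl
  | cons x t ih =>
    rcases List.pairwise_cons.mp h with ⟨hx, ht⟩
    by_cases hxi : x.2 ≤ i
    · have : ¬ (i + 1 ≤ x.2) := by omega
      simp [hxi, this, ih ht]
    · have hfil : t.filter (fun p => decide (i + 1 ≤ p.2)) = t := by
        apply List.filter_eq_self.mpr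
        intro y hy
        have := hx y hy
        simp; omega
      have h2 : i + 1 ≤ x.2 := by omega
      simp only [List.dropWhile_cons, List.filter_cons, decide_eq_true_eq]
      rw [if_neg hxi, if_pos h2, hfil]

-- insertBy, one step at a time.
theorem pvInsertBy_nil {α : Type} (before : α → α → Bool) (x : α) :
    PySem.List.insertBy before x [] = [x] := rfl

theorem pvInsertBy_cons {α : Type} (before : α → α → Bool) (x y : α) (ys : List α) :
    PySem.List.insertBy before x (y :: ys)
      = if before x y then x :: y :: ys else y :: PySem.List.insertBy before x ys := rfl

-- insertBy (Python's stable insertion) preserves sortedness by the key.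
theorem pairwise_insertBy_snd (x : Int × Int) (l : List (Int × Int))
    (h : l.Pairwise (fun a b => a.2 ≤ b.2)) :
    (PySem.List.insertBy (fun a b => decide (a.2 < b.2)) x l).Pairwise (fun a b => a.2 ≤ b.2) := by
  induction l with
  | nil => rw [pvInsertBy_nil]; simp
  | cons y t ih =>
    rcases List.pairwise_cons.mp h with ⟨hy, ht⟩
    rw [pvInsertBy_cons]
    by_cases hxy : x.2 < y.2
    · rw [if_pos (by simpa using hxy)]
      refine List.pairwise_cons.mpr ⟨?_, h⟩
      intro z hz
      rcases List.mem_cons.mp hz with rfl | hz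
      · omega
      · have := hy z hz; omega
    · rw [if_neg (by simpa using hxy)]
      refine List.pairwise_cons.mpr ⟨?_, ih ht⟩
      intro z hz
      rcases (PySem.List.mem_insertBy _ _ _ _).mp hz with rfl | hz
      · omega
      · exact hy z hz

-- Inserting x into a sorted list places it AFTER all equal keys: the key-i group
-- gains x at its end (stability of Python's sort, one insertion step).
theorem filter_insertBy_snd (i : Int) (x : Int × Int) (l : List (Int × Int))
    (h : l.Pairwise (fun a b => a.2 ≤ b.2)) :
    (PySem.List.insertBy (fun a b => decide (a.2 < b.2)) x l).filter (fun p => decide (p.2 = i))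
      = l.filter (fun p => decide (p.2 = i)) ++ (if x.2 = i then [x] else []) := by
  induction l with
  | nil =>
    rw [pvInsertBy_nil]
    by_cases hx : x.2 = i <;> simp [hx]
  | cons y t ih =>
    rcases List.pairwise_cons.mp h with ⟨hy, ht⟩
    rw [pvInsertBy_cons]
    by_cases hxy : x.2 < y.2
    · rw [if_pos (by simpa using hxy)]
      by_cases hx : x.2 = i
      · have hyf : (y :: t).filter (fun p => decide (p.2 = i)) = [] := by
          apply List.filter_eq_nil_iff.mpr
          intro z hz
          rcases List.mem_cons.mp hz with rfl | hz
          · simp; omega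
          · have := hy z hz; simp; omega
        rw [List.filter_cons_of_pos (by simp [hx]), hyf]
        simp [hx]
      · rw [List.filter_cons_of_neg (by simp [hx])]
        simp [hx]
    · rw [if_neg (by simpa using hxy)]
      simp only [List.filter_cons]
      rw [ih ht]
      by_cases hyi : y.2 = i
      · simp [hyi]
      · simp [hyi]

-- Stability of the whole sort: the key-i group of sorted(l, key=snd) is the key-i
-- group of l, in original order.
theorem filter_foldl_insertBy (i : Int) (xs acc : List (Int × Int))
    (h : acc.Pairwise (fun a b => a.2 ≤ b.2)) :
    (xs.foldl (fun acc x => PySem.List.insertBy (fun a b => decide (a.2 < b.2)) x acc) acc).filter (fun p => decide (p.2 = i))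
      = acc.filter (fun p => decide (p.2 = i)) ++ xs.filter (fun p => decide (p.2 = i)) := by
  induction xs generalizing acc with
  | nil => simp
  | cons x t ih =>
    simp only [List.foldl_cons]
    rw [ih _ (pairwise_insertBy_snd x acc h), filter_insertBy_snd i x acc h, List.filter_cons]
    by_cases hx : x.2 = i <;> simp [hx]

theorem filter_sorted_snd (i : Int) (l : List (Int × Int)) :
    (PySem.List.sorted l (fun p => p.2)).filter (fun p => decide (p.2 = i))
      = l.filter (fun p => decide (p.2 = i)) := by
  rw [PySem.List.sorted_eq_foldl_insertBy]
  simpa using filter_foldl_insertBy i l [] (by simp)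

-- The main sweep invariant: folding B's step over range(lo, hi) starting from the
-- sorted remainder {p ∈ S | lo ≤ p.2} produces exactly A's fold state.
theorem main_fold (idxs : List (List Int)) (names : List (List String))
    (E S : List (Int × Int)) (hS : S.Pairwise (fun a b => a.2 ≤ b.2))
    (hfilt : ∀ i, S.filter (fun p => decide (p.2 = i)) = E.filter (fun p => decide (p.2 = i)))
    (k : Nat) :
    ∀ (lo : Int) (a : List Int) (b : List String) (o1 : List (List Int)) (o2 : List (List String)),
    ((PySem.List.pyRange lo (lo + k) 1).foldl
      (fun (st : List (Int × Int) × List Int × List String × List (List Int) × List (List String)) i =>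
        let sw := pvSweep idxs names i st.1 st.2.1 st.2.2.1
        (sw.1, sw.2.1, sw.2.2, st.2.2.2.1 ++ [sw.2.1], st.2.2.2.2 ++ [sw.2.2]))
      (S.filter (fun p => decide (lo ≤ p.2)), a, b, o1, o2)).2
    = (PySem.List.pyRange lo (lo + k) 1).foldl
      (fun (st : List Int × List String × List (List Int) × List (List String)) i =>
        let ap := ((E.filter (fun p => p.2 == i)).map (·.1)).foldl
          (fun (ap : List Int × List String) item =>
            (ap.1 ++ PySem.List.pyGetD idxs item [],
             ap.2 ++ PySem.List.pyGetD names item []))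
          (st.1, st.2.1)
        (ap.1, ap.2, st.2.2.1 ++ [ap.1], st.2.2.2 ++ [ap.2]))
      (a, b, o1, o2) := by
  induction k with
  | zero =>
    intro lo a b o1 o2
    rw [show lo + (0 : Nat) = lo by simp, PySem.List.pyRange_one_eq_nil (le_refl lo)]
    rfl
  | succ k ih =>
    intro lo a b o1 o2
    have hlt : lo < lo + (k + 1 : Nat) := by push_cast; omega
    rw [PySem.List.pyRange_one_cons hlt]
    simp only [List.foldl_cons]
    have hpair : (S.filter (fun p => decide (lo ≤ p.2))).Pairwise (fun a b => a.2 ≤ b.2) :=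
      List.Pairwise.filter _ hS
    rw [pvSweep_eq, takeWhile_eq_filter_of_sorted lo _ hpair, dropWhile_eq_filter_of_sorted lo _ hpair]
    -- the consumed group is exactly the key-lo group of E
    have htaken : (S.filter (fun p => decide (lo ≤ p.2))).filter (fun p => decide (p.2 ≤ lo))
        = E.filter (fun p => p.2 == lo) := by
      rw [List.filter_filter]
      have h1 : ∀ p : Int × Int, ((decide (p.2 ≤ lo)) && (decide (lo ≤ p.2))) = decide (p.2 = lo) := by
        intro p
        by_cases h : p.2 = lo
        · simp [h]
        · simp [h]; omega
      have h2 : ∀ p : Int × Int, (p.2 == lo) = decide (p.2 = lo) := by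
        intro p; rfl
      rw [List.filter_congr (fun p _ => h1 p), hfilt lo, List.filter_congr (fun p _ => h2 p)]
    -- the remainder is the filter at lo+1
    have hrem : (S.filter (fun p => decide (lo ≤ p.2))).filter (fun p => decide (lo + 1 ≤ p.2))
        = S.filter (fun p => decide (lo + 1 ≤ p.2)) := by
      rw [List.filter_filter]
      apply List.filter_congr
      intro p _
      by_cases h : lo + 1 ≤ p.2
      · simp [h]; omega
      · simp [h]
    rw [htaken, hrem]
    simp only [foldl_extend_pair]
    simp only [List.flatMap_map]
    have := ih (lo + 1) (a ++ (E.filter (fun p => p.2 == lo)).flatMap fun p => PySem.List.pyGetD idxs p.1 [])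
      (b ++ (E.filter (fun p => p.2 == lo)).flatMap fun p => PySem.List.pyGetD names p.1 [])
      (o1 ++ [a ++ (E.filter (fun p => p.2 == lo)).flatMap fun p => PySem.List.pyGetD idxs p.1 []])
      (o2 ++ [b ++ (E.filter (fun p => p.2 == lo)).flatMap fun p => PySem.List.pyGetD names p.1 []])
    rw [show lo + (k + 1 : Nat) = (lo + 1) + (k : Nat) by push_cast; omega]
    simp only [foldl_extend_pair, List.flatMap_map] at this
    exact this

-- ===== VERDICT (by name: the statement is the Claim_ definition above) =====
theorem autonomous_pairs_species_cyclicQ_spec : Claim_equal_autonomous_pairs_species_cyclicQ := by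
  intro names idxs scores _ _
  unfold Spec_autonomous_pairs_species_cyclicQ
  unfold autonomous_pairs_species_cyclicQ autonomous_pairs_species_cyclicQ_alt
  cases hm : PySem.List.min? scores (fun x => x) with
  | none => cases hM : PySem.List.max? scores (fun x => x) <;> rfl
  | some m =>
    cases hM : PySem.List.max? scores (fun x => x) with
    | none => rfl
    | some M =>
      simp only []
      set E := PySem.List.enumerate scores 0 with hE
      set S := PySem.List.sorted E (fun p => p.2) with hS
      have hpair : S.Pairwise (fun a b => a.2 ≤ b.2) := PySem.List.sorted_pairwise E (fun p => p.2)
      have hfilt : ∀ i, S.filter (fun p => decide (p.2 = i)) = E.filter (fun p => decide (p.2 = i)) :=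
        fun i => filter_sorted_snd i E
      have hmM : m ≤ M := by
        have hmem : m ∈ scores := PySem.List.min?_mem hm
        exact PySem.List.max?_isMax hM m hmem
      -- all scores are ≥ m, so the initial remainder is all of S
      have hinit : S = S.filter (fun p => decide (m ≤ p.2)) := by
        symm; apply List.filter_eq_self.mpr
        intro p hp
        have hpE : p ∈ E := (PySem.List.mem_sorted _ _ _ _).mp hp
        rcases (PySem.List.mem_enumerate_iff _ _ _).mp hpE with ⟨k, hk, rfl⟩
        have : scores[k] ∈ scores := List.getElem_mem hk
        have := PySem.List.min?_isMin hm _ this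
        simpa using this
      have hrange : M + 1 = m + ((M + 1 - m).toNat : Int) := by omega
      rw [hrange, hinit]
      have := main_fold idxs names E S hpair hfilt (M + 1 - m).toNat m [] [] [] []
      -- both sides project the same fold states
      exact congrArg (fun st : List Int × List String × List (List Int) × List (List String) => (st.2.2.1, st.2.2.2)) this.symm
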